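-- pv_equiv track=rewrite | github.com/govorges/openbroadcast-video | Video.py | utility_is_video_id_valid
-- ===== SOURCE A (Python) =====
-- def utility_is_video_id_valid(video_id: str) -> bool:
--     '''Checks if a video_id is properly formatted.'''
--     if len(video_id) != 12:
--         return False
--     seq = "AaBbCcDdEeFfGgHhIiJjKkLlMmNnOoPpQqRrSsTtUuVvWwXxYyZz1234567890"
--     for char in video_id:
--         if char not in seq:
--             return False
--     return True
-- ===== SOURCE B (Python) =====
-- import re
--
-- _VIDEO_ID_RE = re.compile(r"[A-Za-z0-9]{12}")
--
-- def utility_is_video_id_valid(video_id: str) -> bool: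
--     '''Checks if a video_id is properly formatted.'''
--     return bool(_VIDEO_ID_RE.fullmatch(video_id))
-- ===== Notes on version B (the rewrite author's own statement) =====
-- stated objective: idiomatic
-- what changed: Replaces the explicit length guard and per-character membership loop over a 63-char alphabet string with a single anchored regex fullmatch of [A-Za-z0-9]{12}.
import Mathlib
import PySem

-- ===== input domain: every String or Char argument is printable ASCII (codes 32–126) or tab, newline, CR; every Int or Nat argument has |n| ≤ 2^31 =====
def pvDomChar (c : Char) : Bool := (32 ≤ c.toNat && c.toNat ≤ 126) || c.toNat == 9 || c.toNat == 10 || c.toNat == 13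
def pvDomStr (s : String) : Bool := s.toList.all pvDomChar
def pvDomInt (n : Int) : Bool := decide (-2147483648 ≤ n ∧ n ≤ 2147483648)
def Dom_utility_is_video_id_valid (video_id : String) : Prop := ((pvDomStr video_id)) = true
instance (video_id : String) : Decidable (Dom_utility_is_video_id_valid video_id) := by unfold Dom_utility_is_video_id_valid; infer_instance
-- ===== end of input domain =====

-- B replaces A's length guard + per-character membership loop over a 63-char alphabet
-- string with a single anchored regex fullmatch of [A-Za-z0-9]{12} (idiomatic).

-- ===== PORT A =====
-- the alphabet string A assigns to `seq`
def pvSeqA : String := "AaBbCcDdEeFfGgHhIiJjKkLlMmNnOoPpQqRrSsTtUuVvWwXxYyZz1234567890"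

-- A's `for char in video_id: if char not in seq: return False` loop;
-- `char in seq` for a single character is exactly membership of that character in seq
def pvLoopA : List Char → Bool
  | [] => true
  | c :: rest => if pvSeqA.toList.contains c = false then false else pvLoopA rest

def utility_is_video_id_valid (video_id : String) : Bool :=
  if PySem.Str.len video_id ≠ 12 then false
  else pvLoopA video_id.toList

-- ===== PORT B =====
-- the regex character class [A-Za-z0-9]
def pvAlnumAscii (c : Char) : Bool :=
  ('A' ≤ c && c ≤ 'Z') || ('a' ≤ c && c ≤ 'z') || ('0' ≤ c && c ≤ '9')

-- re.fullmatch(r"[A-Za-z0-9]{12}", s) succeeds iff s has exactly 12 characters,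
-- each one in the class [A-Za-z0-9]; bool(...) of that match is the result
def utility_is_video_id_valid_alt (video_id : String) : Bool :=
  decide (PySem.Str.len video_id = 12) && video_id.toList.all pvAlnumAscii

-- ===== PRECONDITION & SPEC =====
def Spec_utility_is_video_id_valid (video_id : String) (out : Bool) : Prop := out = utility_is_video_id_valid_alt video_id
instance (video_id : String) (out : Bool) : Decidable (Spec_utility_is_video_id_valid video_id out) := by unfold Spec_utility_is_video_id_valid; infer_instance

-- ===== CLAIM (what is proved, stated in full; the proofs are below) =====
def Claim_equal_utility_is_video_id_valid : Prop := ∀ (video_id : String), Dom_utility_is_video_id_valid video_id → Spec_utility_is_video_id_valid video_id (utility_is_video_id_valid video_id)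

-- ===== LEMMAS AND PROOFS =====

theorem pvSeqA_toList : pvSeqA.toList = ['A', 'a', 'B', 'b', 'C', 'c', 'D', 'd', 'E', 'e', 'F', 'f', 'G', 'g', 'H', 'h', 'I', 'i', 'J', 'j', 'K', 'k', 'L', 'l', 'M', 'm', 'N', 'n', 'O', 'o', 'P', 'p', 'Q', 'q', 'R', 'r', 'S', 's', 'T', 't', 'U', 'u', 'V', 'v', 'W', 'w', 'X', 'x', 'Y', 'y', 'Z', 'z', '1', '2', '3', '4', '5', '6', '7', '8', '9', '0'] := rfl

theorem char_eq_iff_toNat (c d : Char) : c = d ↔ c.toNat = d.toNat := by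
  rw [Char.ext_iff, ← UInt32.toNat_inj]; rfl

theorem char_le_iff_toNat (c d : Char) : c ≤ d ↔ c.toNat ≤ d.toNat := Iff.rfl

-- a character is in A's alphabet string exactly when it is in the class [A-Za-z0-9]
theorem contains_seqA_eq_alnum (c : Char) : pvSeqA.toList.contains c = pvAlnumAscii c := by
  rw [Bool.eq_iff_iff, pvSeqA_toList]
  simp only [pvAlnumAscii, List.contains_eq_mem, decide_eq_true_iff, List.mem_cons,
    List.not_mem_nil, or_false, Bool.or_eq_true, Bool.and_eq_true,
    char_le_iff_toNat, char_eq_iff_toNat,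
    show ('A' : Char).toNat = 65 from rfl,
    show ('a' : Char).toNat = 97 from rfl,
    show ('B' : Char).toNat = 66 from rfl,
    show ('b' : Char).toNat = 98 from rfl,
    show ('C' : Char).toNat = 67 from rfl,
    show ('c' : Char).toNat = 99 from rfl,
    show ('D' : Char).toNat = 68 from rfl,
    show ('d' : Char).toNat = 100 from rfl,
    show ('E' : Char).toNat = 69 from rfl,
    show ('e' : Char).toNat = 101 from rfl,
    show ('F' : Char).toNat = 70 from rfl,
    show ('f' : Char).toNat = 102 from rfl,
    show ('G' : Char).toNat = 71 from rfl,
    show ('g' : Char).toNat = 103 from rfl,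
    show ('H' : Char).toNat = 72 from rfl,
    show ('h' : Char).toNat = 104 from rfl,
    show ('I' : Char).toNat = 73 from rfl,
    show ('i' : Char).toNat = 105 from rfl,
    show ('J' : Char).toNat = 74 from rfl,
    show ('j' : Char).toNat = 106 from rfl,
    show ('K' : Char).toNat = 75 from rfl,
    show ('k' : Char).toNat = 107 from rfl,
    show ('L' : Char).toNat = 76 from rfl,
    show ('l' : Char).toNat = 108 from rfl,
    show ('M' : Char).toNat = 77 from rfl,
    show ('m' : Char).toNat = 109 from rfl,
    show ('N' : Char).toNat = 78 from rfl,
    show ('n' : Char).toNat = 110 from rfl,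
    show ('O' : Char).toNat = 79 from rfl,
    show ('o' : Char).toNat = 111 from rfl,
    show ('P' : Char).toNat = 80 from rfl,
    show ('p' : Char).toNat = 112 from rfl,
    show ('Q' : Char).toNat = 81 from rfl,
    show ('q' : Char).toNat = 113 from rfl,
    show ('R' : Char).toNat = 82 from rfl,
    show ('r' : Char).toNat = 114 from rfl,
    show ('S' : Char).toNat = 83 from rfl,
    show ('s' : Char).toNat = 115 from rfl,
    show ('T' : Char).toNat = 84 from rfl,
    show ('t' : Char).toNat = 116 from rfl,
    show ('U' : Char).toNat = 85 from rfl,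
    show ('u' : Char).toNat = 117 from rfl,
    show ('V' : Char).toNat = 86 from rfl,
    show ('v' : Char).toNat = 118 from rfl,
    show ('W' : Char).toNat = 87 from rfl,
    show ('w' : Char).toNat = 119 from rfl,
    show ('X' : Char).toNat = 88 from rfl,
    show ('x' : Char).toNat = 120 from rfl,
    show ('Y' : Char).toNat = 89 from rfl,
    show ('y' : Char).toNat = 121 from rfl,
    show ('Z' : Char).toNat = 90 from rfl,
    show ('z' : Char).toNat = 122 from rfl,
    show ('1' : Char).toNat = 49 from rfl,
    show ('2' : Char).toNat = 50 from rfl,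
    show ('3' : Char).toNat = 51 from rfl,
    show ('4' : Char).toNat = 52 from rfl,
    show ('5' : Char).toNat = 53 from rfl,
    show ('6' : Char).toNat = 54 from rfl,
    show ('7' : Char).toNat = 55 from rfl,
    show ('8' : Char).toNat = 56 from rfl,
    show ('9' : Char).toNat = 57 from rfl,
    show ('0' : Char).toNat = 48 from rfl]
  omega

-- A's loop is an all-check with A's membership predicate
theorem pvLoopA_eq_all (l : List Char) : pvLoopA l = l.all pvAlnumAscii := by
  induction l with
  | nil => rfl
  | cons c rest ih =>
    simp only [pvLoopA, List.all_cons, contains_seqA_eq_alnum, ih]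
    cases pvAlnumAscii c <;> simp

-- ===== VERDICT (by name: the statement is the Claim_ definition above) =====
theorem utility_is_video_id_valid_spec : Claim_equal_utility_is_video_id_valid := by
  intro video_id _
  unfold Spec_utility_is_video_id_valid utility_is_video_id_valid utility_is_video_id_valid_alt
  rw [pvLoopA_eq_all]
  by_cases h : PySem.Str.len video_id = 12
  · simp
  · simp
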